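-- pv_equiv track=rewrite | github.com/lm7405/safety_trosar_ | safetyTrosar/structure/qtableviewModel.py | index_from_string
-- ===== SOURCE A (Python) =====
-- def index_from_string(cell_string: str):
--     row = 0
--     column = 0
--
--     number_flag = False
--     for letter in cell_string:
--         if letter.isupper():
--             if number_flag is True:
--                 return None
--             column = column * 26 + ord(letter) - ord('A')
--         elif letter.isdigit():
--             row = row * 10 + int(letter)
--             number_flag = True
--         else:
--             return None
--     row -= 1
--
--     return row, column
-- ===== SOURCE B (Python) =====
-- def index_from_string(cell_string: str):
--     # split at the letter/digit boundary, validate, then two closed folds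
--     i = 0
--     n = len(cell_string)
--     while i < n and cell_string[i].isupper():
--         i += 1
--     letters = cell_string[:i]
--     digits = cell_string[i:]
--     for ch in digits:
--         if not ch.isdigit():
--             return None
--     column = 0
--     for ch in letters:
--         column = column * 26 + ord(ch) - ord('A')
--     row = 0
--     for ch in digits:
--         row = row * 10 + int(ch)
--     return row - 1, column
-- ===== Notes on version B (the rewrite author's own statement) =====
-- stated objective: simpler
-- what changed: B splits the string once at the uppercase/digit boundary, validates the digit tail in one pass, and computes column and row with two independent accumulation loops, instead of A's single stateful loop with a number_flag and interleaved early returns.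
import Mathlib
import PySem

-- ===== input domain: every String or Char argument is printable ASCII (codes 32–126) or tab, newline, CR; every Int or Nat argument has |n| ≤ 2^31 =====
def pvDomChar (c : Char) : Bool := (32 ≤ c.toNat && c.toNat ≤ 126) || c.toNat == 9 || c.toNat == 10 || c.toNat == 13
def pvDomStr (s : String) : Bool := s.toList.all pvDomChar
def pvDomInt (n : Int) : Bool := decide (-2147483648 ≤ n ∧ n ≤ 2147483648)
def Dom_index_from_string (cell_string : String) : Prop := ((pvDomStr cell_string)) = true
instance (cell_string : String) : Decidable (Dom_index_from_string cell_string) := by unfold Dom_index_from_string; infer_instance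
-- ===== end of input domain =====

-- B replaces A's single stateful flag-loop by a split at the uppercase/digit boundary,
-- a validation pass, and two independent accumulation folds (objective: simpler).

-- ===== PORT A =====
-- single loop over the characters carrying (row, column, number_flag);
-- int(letter) after the isdigit guard is the digit value c.toNat - 48 (exact on ASCII digits)
def pvLoopA : List Char → Int → Int → Bool → Option (Int × Int)
  | [], row, column, _ => some (row - 1, column)
  | c :: cs, row, column, flag =>
    if PySem.Chars.isupper c then
      if flag = true then none
      else pvLoopA cs row (column * 26 + ((c.toNat : Int) - 65)) flag
    else if PySem.Chars.isdigit c then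
      pvLoopA cs (row * 10 + ((c.toNat : Int) - 48)) column true
    else none

def index_from_string (cell_string : String) : Option (Int × Int) :=
  pvLoopA cell_string.toList 0 0 false

-- ===== PORT B =====
def index_from_string_alt (cell_string : String) : Option (Int × Int) :=
  let cs := cell_string.toList
  let letters := cs.takeWhile PySem.Chars.isupper
  let digits := cs.dropWhile PySem.Chars.isupper
  if digits.all PySem.Chars.isdigit then
    some ((digits.foldl (fun r c => r * 10 + ((c.toNat : Int) - 48)) 0) - 1,
          letters.foldl (fun col c => col * 26 + ((c.toNat : Int) - 65)) 0)
  else none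

-- ===== PRECONDITION & SPEC =====
def Spec_index_from_string (cell_string : String) (out : Option (Int × Int)) : Prop := out = index_from_string_alt cell_string
instance (cell_string : String) (out : Option (Int × Int)) : Decidable (Spec_index_from_string cell_string out) := by unfold Spec_index_from_string; infer_instance

-- ===== CLAIM (what is proved, stated in full; the proofs are below) =====
def Claim_equal_index_from_string : Prop := ∀ (cell_string : String), Dom_index_from_string cell_string → Spec_index_from_string cell_string (index_from_string cell_string)

-- ===== LEMMAS AND PROOFS =====

theorem pv_digit_not_upper (c : Char) (h : PySem.Chars.isdigit c = true) :
    PySem.Chars.isupper c = false := by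
  simp only [PySem.Chars.isdigit, Bool.and_eq_true, decide_eq_true_eq] at h
  have hA : ¬ ('A' ≤ c) := fun hA => absurd (le_trans hA h.2) (by decide)
  simp [PySem.Chars.isupper, hA]

-- A's loop in the flag = true phase: digit-only tail, base-10 accumulation
theorem pv_loopA_true (cs : List Char) (row column : Int) :
    pvLoopA cs row column true =
      if cs.all PySem.Chars.isdigit then
        some ((cs.foldl (fun r c => r * 10 + ((c.toNat : Int) - 48)) row) - 1, column)
      else none := by
  induction cs generalizing row with
  | nil => simp [pvLoopA]
  | cons c cs ih =>
    by_cases hd : PySem.Chars.isdigit c = true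
    · have hu := pv_digit_not_upper c hd
      simp [pvLoopA, hu, hd, ih]
    · simp only [Bool.not_eq_true] at hd
      by_cases hu : PySem.Chars.isupper c = true
      · simp [pvLoopA, hu, hd]
      · simp only [Bool.not_eq_true] at hu
        simp [pvLoopA, hu, hd]

-- A's loop in the flag = false phase equals B's split-and-fold computation
theorem pv_loopA_false (cs : List Char) (row column : Int) :
    pvLoopA cs row column false =
      (if (cs.dropWhile PySem.Chars.isupper).all PySem.Chars.isdigit then
        some (((cs.dropWhile PySem.Chars.isupper).foldl (fun r c => r * 10 + ((c.toNat : Int) - 48)) row) - 1,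
              (cs.takeWhile PySem.Chars.isupper).foldl (fun col c => col * 26 + ((c.toNat : Int) - 65)) column)
      else none) := by
  induction cs generalizing row column with
  | nil => simp [pvLoopA]
  | cons c cs ih =>
    by_cases hu : PySem.Chars.isupper c = true
    · simp [pvLoopA, hu, ih]
    · simp only [Bool.not_eq_true] at hu
      by_cases hd : PySem.Chars.isdigit c = true
      · simp [pvLoopA, hu, hd, pv_loopA_true]
      · simp only [Bool.not_eq_true] at hd
        simp [pvLoopA, hu, hd]

-- ===== VERDICT (by name: the statement is the Claim_ definition above) =====
theorem index_from_string_spec : Claim_equal_index_from_string := by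
  intro s _
  unfold Spec_index_from_string index_from_string index_from_string_alt
  simp [pv_loopA_false]
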